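-- pv_equiv track=rewrite | github.com/1440661024/video_download | backend/app/routers/summary_stream.py | _sse_message
-- ===== SOURCE A (Python) =====
-- def _sse_message(data: str, event: str | None = None) -> str:
--     # Preserve trailing newlines so streamed Markdown keeps its structure.
--     normalized = data.replace("\r\n", "\n").replace("\r", "\n")
--     lines = normalized.split("\n")
--     payload: list[str] = []
--     if event:
--         payload.append(f"event: {event}")
--     for line in lines:
--         payload.append(f"data: {line}")
--     return "\n".join(payload) + "\n\n"
-- ===== SOURCE B (Python) =====
-- def _sse_message(data: str, event: str | None = None) -> str:
--     # Preserve trailing newlines so streamed Markdown keeps its structure.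
--     normalized = data.replace("\r\n", "\n").replace("\r", "\n")
--     body = "data: " + normalized.replace("\n", "\ndata: ")
--     if event:
--         return f"event: {event}\n{body}\n\n"
--     return body + "\n\n"
-- ===== Notes on version B (the rewrite author's own statement) =====
-- stated objective: simpler
-- what changed: Replaces the split-into-lines / payload-list loop / join pipeline with a single string substitution that rewrites each newline into a newline followed by the data prefix, then assembles the result directly with no intermediate list.
import Mathlib
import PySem

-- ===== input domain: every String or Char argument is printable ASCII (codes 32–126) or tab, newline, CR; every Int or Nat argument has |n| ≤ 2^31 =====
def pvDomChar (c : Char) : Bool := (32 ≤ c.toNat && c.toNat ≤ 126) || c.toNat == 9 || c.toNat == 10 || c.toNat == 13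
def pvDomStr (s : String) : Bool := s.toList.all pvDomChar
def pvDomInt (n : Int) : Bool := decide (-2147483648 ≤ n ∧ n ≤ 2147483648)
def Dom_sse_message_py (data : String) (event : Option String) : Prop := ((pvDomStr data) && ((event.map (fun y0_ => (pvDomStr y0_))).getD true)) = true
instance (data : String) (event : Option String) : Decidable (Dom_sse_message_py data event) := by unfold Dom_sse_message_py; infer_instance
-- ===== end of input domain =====

-- B replaces A's split-into-lines / payload-list loop / join pipeline with a single
-- replace("\n", "\ndata: ") substitution and direct string assembly (objective: simpler).

-- ===== PORT A =====
def sse_message_py (data : String) (event : Option String) : String :=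
  let normalized := PySem.Str.replace (PySem.Str.replace data "\r\n" "\n") "\r" "\n"
  -- sep "\n" ≠ "", so split? is always `some`; getD [] is unreachable padding
  let lines : List String := (PySem.Str.split? normalized "\n").getD []
  let payload : List String :=
    match event with
    | some e => if e = "" then [] else ["event: " ++ e]   -- `if event:` — str truthiness
    | none => []
  let payload := lines.foldl (fun acc line => acc ++ ["data: " ++ line]) payload
  PySem.Str.join "\n" payload ++ "\n\n"

-- ===== PORT B =====
def sse_message_py_alt (data : String) (event : Option String) : String :=
  let normalized := PySem.Str.replace (PySem.Str.replace data "\r\n" "\n") "\r" "\n"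
  let body := "data: " ++ PySem.Str.replace normalized "\n" "\ndata: "
  match event with
  | some e => if e = "" then body ++ "\n\n" else "event: " ++ e ++ "\n" ++ body ++ "\n\n"
  | none => body ++ "\n\n"

-- ===== PRECONDITION & SPEC =====
def Spec_sse_message_py (data : String) (event : Option String) (out : String) : Prop := out = sse_message_py_alt data event
instance (data : String) (event : Option String) (out : String) : Decidable (Spec_sse_message_py data event out) := by unfold Spec_sse_message_py; infer_instance

-- ===== CLAIM (what is proved, stated in full; the proofs are below) =====
def Claim_equal_sse_message_py : Prop := ∀ (data : String) (event : Option String), Dom_sse_message_py data event → Spec_sse_message_py data event (sse_message_py data event)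

-- ===== LEMMAS AND PROOFS =====

/-- The pieces of a char list split at every occurrence of `a` (always nonempty). -/
def pvPieces (a : Char) : List Char → List (List Char)
  | [] => [[]]
  | c :: t =>
    if c = a then [] :: pvPieces a t
    else match pvPieces a t with
         | [] => [[c]]
         | h :: ts => (c :: h) :: ts

/-- Prepend `p` onto the first piece. -/
def pvConsHead (p : List Char) : List (List Char) → List (List Char)
  | [] => [p]
  | h :: ts => (p ++ h) :: ts

theorem pvPieces_ne_nil (a : Char) (s : List Char) : pvPieces a s ≠ [] := by
  cases s with
  | nil => simp [pvPieces]
  | cons c t =>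
    unfold pvPieces
    split
    · simp
    · split <;> simp

theorem pvPieces_cons_ne (a c : Char) (t : List Char) (h : ¬ c = a) :
    pvPieces a (c :: t) = pvConsHead [c] (pvPieces a t) := by
  rw [pvPieces, if_neg h]
  cases hp : pvPieces a t <;> simp [pvConsHead]

theorem pvConsHead_consHead (p q : List Char) (xs : List (List Char)) :
    pvConsHead p (pvConsHead q xs) = pvConsHead (p ++ q) xs := by
  cases xs <;> simp [pvConsHead]

theorem pvConsHead_nil (xs : List (List Char)) (h : xs ≠ []) : pvConsHead [] xs = xs := by
  cases xs with
  | nil => exact absurd rfl h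
  | cons y ys => simp [pvConsHead]

theorem pvGoSplit (a : Char) : ∀ (fuel : Nat) (s cur : List Char) (acc : List (List Char)) (_ : s.length < fuel),
    PySem.Chars.splitOn.go [a] fuel s cur acc
      = acc.reverse ++ pvConsHead cur.reverse (pvPieces a s) := by
  intro fuel
  induction fuel with
  | zero => intro s cur acc h; omega
  | succ n ih =>
    intro s cur acc h
    cases s with
    | nil =>
      simp [PySem.Chars.splitOn.go, pvPieces, pvConsHead]
    | cons c rest =>
      rw [PySem.Chars.splitOn.go]
      by_cases hc : c = a
      · subst hc
        have hpre : [c].isPrefixOf (c :: rest) = true := by simp [List.isPrefixOf]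
        rw [if_pos hpre]
        have := ih rest [] (cur.reverse :: acc) (by simpa using Nat.lt_of_succ_lt_succ h)
        simp only [List.length_singleton, List.drop_succ_cons, List.drop_zero] at this ⊢
        rw [this]
        simp [pvPieces, pvConsHead]
        cases hp2 : pvPieces c rest with
        | nil => exact absurd hp2 (pvPieces_ne_nil _ rest)
        | cons => rfl
      · have hpre : [a].isPrefixOf (c :: rest) = false := by
          simp [List.isPrefixOf]
          exact fun h' => absurd h'.symm hc
        rw [if_neg (by simp [hpre])]
        have := ih rest (c :: cur) acc (by simpa using Nat.lt_of_succ_lt_succ h)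
        rw [this, pvPieces_cons_ne a c rest hc, pvConsHead_consHead, List.reverse_cons]

theorem pvSplitOn_single (a : Char) (s : List Char) :
    PySem.Chars.splitOn s [a] = pvPieces a s := by
  unfold PySem.Chars.splitOn
  rw [pvGoSplit a (s.length + 1) s [] [] (by omega)]
  simp [pvConsHead_nil _ (pvPieces_ne_nil a s)]

theorem pvGoReplace (a : Char) (new : List Char) :
    ∀ (fuel : Nat) (s acc : List Char) (_ : s.length ≤ fuel),
    PySem.Chars.replace.go [a] new fuel s acc
      = acc.reverse ++ s.flatMap (fun c => if c = a then new else [c]) := by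
  intro fuel
  induction fuel with
  | zero =>
    intro s acc h
    have : s = [] := List.eq_nil_of_length_eq_zero (Nat.le_zero.mp h)
    subst this
    simp [PySem.Chars.replace.go]
  | succ n ih =>
    intro s acc h
    cases s with
    | nil => simp [PySem.Chars.replace.go]
    | cons c rest =>
      rw [PySem.Chars.replace.go]
      by_cases hc : c = a
      · subst hc
        have hpre : [c].isPrefixOf (c :: rest) = true := by simp [List.isPrefixOf]
        rw [if_pos hpre]
        have := ih rest (new.reverse ++ acc) (by simpa using Nat.le_of_succ_le_succ h)
        simp only [List.length_singleton, List.drop_succ_cons, List.drop_zero] at this ⊢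
        rw [this]
        simp
      · have hpre : [a].isPrefixOf (c :: rest) = false := by
          simp [List.isPrefixOf]
          exact fun h' => absurd h'.symm hc
        rw [if_neg (by simp [hpre])]
        have := ih rest (c :: acc) (by simpa using Nat.le_of_succ_le_succ h)
        rw [this]
        simp [hc]

theorem pvReplace_single (a : Char) (new s : List Char) :
    PySem.Chars.replace s [a] new = s.flatMap (fun c => if c = a then new else [c]) := by
  unfold PySem.Chars.replace
  rw [if_neg (by simp)]
  rw [pvGoReplace a new s.length s [] (le_refl _)]
  simp

theorem pvFoldlAppendMap {α β : Type} (g : α → β) :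
    ∀ (l : List α) (init : List β),
    l.foldl (fun acc x => acc ++ [g x]) init = init ++ l.map g := by
  intro l
  induction l with
  | nil => simp
  | cons x t ih => intro init; simp [List.foldl_cons, ih]

theorem pvJoinConsFlat (a : Char) :
    ∀ (xs : List (List Char)) (x : List Char),
    List.intercalate [a] (x :: xs) = x ++ xs.flatMap (fun y => a :: y) := by
  intro xs
  induction xs with
  | nil => intro x; simp [List.intercalate]
  | cons y ys ih =>
    intro x
    have hstep : List.intercalate [a] (x :: y :: ys) = x ++ [a] ++ List.intercalate [a] (y :: ys) := by
      simp [List.intercalate]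
    rw [hstep, ih y]
    simp

theorem pvMain (a : Char) (pre : List Char) (s : List Char) :
    List.intercalate [a] ((pvPieces a s).map (fun p => pre ++ p))
      = pre ++ s.flatMap (fun c => if c = a then a :: pre else [c]) := by
  induction s with
  | nil => simp [pvPieces, List.intercalate]
  | cons c t ih =>
    obtain ⟨h, ts, hp⟩ : ∃ h ts, pvPieces a t = h :: ts := by
      cases hp : pvPieces a t with
      | nil => exact absurd hp (pvPieces_ne_nil a t)
      | cons h ts => exact ⟨h, ts, rfl⟩
    rw [hp] at ih
    simp only [List.map_cons] at ih
    rw [pvJoinConsFlat a] at ih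
    have hcore : h ++ (ts.map (fun p => pre ++ p)).flatMap (fun y => a :: y)
        = t.flatMap (fun c => if c = a then a :: pre else [c]) := by
      have := ih
      simp only [List.append_assoc] at this
      exact List.append_cancel_left this
    by_cases hc : c = a
    · subst hc
      have hpc : pvPieces c (c :: t) = [] :: pvPieces c t := by simp [pvPieces]
      rw [hpc, hp]
      rw [List.map_cons, pvJoinConsFlat c]
      simp only [List.flatMap_cons, List.map_cons]
      rw [← hcore]
      simp
    · rw [pvPieces_cons_ne a c t hc, hp]
      simp only [pvConsHead]
      rw [List.map_cons, pvJoinConsFlat a]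
      simp only [List.flatMap_cons, if_neg hc]
      rw [← hcore]
      simp

theorem pvCharsKey (N : List Char) :
    PySem.Chars.join ['\n'] ((PySem.Chars.splitOn N ['\n']).map (fun p => "data: ".toList ++ p))
      = "data: ".toList ++ PySem.Chars.replace N ['\n'] ('\n' :: "data: ".toList) := by
  rw [pvSplitOn_single, pvReplace_single]
  exact pvMain '\n' "data: ".toList N

theorem pvToListNL : ("\n" : String).toList = ['\n'] := rfl
theorem pvToListBody : ("\ndata: " : String).toList = '\n' :: "data: ".toList := rfl

theorem pvLinesMap (N : String) :
    (((PySem.Str.split? N "\n").getD []).map String.toList) = PySem.Chars.splitOn N.toList ['\n'] := by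
  have h := PySem.Str.split?_map N "\n"
  cases hs : PySem.Str.split? N "\n" with
  | none =>
    rw [hs] at h
    simp [PySem.Chars.split?] at h
  | some L =>
    rw [hs] at h
    have hsp : PySem.Chars.split? N.toList "\n".toList = some (PySem.Chars.splitOn N.toList "\n".toList) := by
      simp [PySem.Chars.split?]
    rw [hsp] at h
    simp only [Option.map_some, Option.some.injEq] at h
    rw [pvToListNL] at h
    simpa using h

theorem pvStringKey (N : String) :
    PySem.Str.join "\n" (((PySem.Str.split? N "\n").getD []).foldl
        (fun acc line => acc ++ ["data: " ++ line]) [])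
      = "data: " ++ PySem.Str.replace N "\n" "\ndata: " := by
  apply String.toList_injective
  rw [pvFoldlAppendMap]
  simp only [List.nil_append]
  rw [PySem.Str.toList_join]
  simp only [String.toList_append, PySem.Str.toList_replace]
  rw [List.map_map]
  have hm : (String.toList ∘ fun line => "data: " ++ line)
      = (fun p => "data: ".toList ++ p) ∘ String.toList := by
    funext x; simp
  rw [hm, ← List.map_map, pvLinesMap, pvToListNL, pvToListBody]
  exact pvCharsKey N.toList

theorem pvJoinConsCons (x y : String) (ys : List String) :
    PySem.Str.join "\n" (x :: y :: ys) = x ++ "\n" ++ PySem.Str.join "\n" (y :: ys) := by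
  apply String.toList_injective
  rw [PySem.Str.toList_join]
  simp only [String.toList_append, PySem.Str.toList_join, List.map_cons]
  simp [PySem.Chars.join, List.intercalate, pvToListNL]

theorem pvPayloadNeNil (N : String) :
    ∃ y ys, ((PySem.Str.split? N "\n").getD []).foldl
        (fun acc line => acc ++ ["data: " ++ line]) [] = y :: ys := by
  rw [pvFoldlAppendMap]
  have h : ((PySem.Str.split? N "\n").getD []) ≠ [] := by
    intro hnil
    have h3 : pvPieces '\n' N.toList = [] := by
      rw [← pvSplitOn_single, ← pvLinesMap N, hnil]; rfl
    exact pvPieces_ne_nil _ _ h3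
  cases hl : ((PySem.Str.split? N "\n").getD []) with
  | nil => exact absurd hl h
  | cons z zs =>
    exact ⟨"data: " ++ z, zs.map (fun l => "data: " ++ l), by simp⟩

-- ===== VERDICT (by name: the statement is the Claim_ definition above) =====
theorem sse_message_py_spec : Claim_equal_sse_message_py := by
  intro data event _
  unfold Spec_sse_message_py sse_message_py sse_message_py_alt
  simp only []
  set N := PySem.Str.replace (PySem.Str.replace data "\r\n" "\n") "\r" "\n" with hN
  cases event with
  | none =>
    simp only []
    rw [pvStringKey N]
  | some e =>
    by_cases he : e = ""
    · simp only [if_pos he]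
      rw [pvStringKey N]
    · simp only [if_neg he]
      obtain ⟨y, ys, hpay⟩ := pvPayloadNeNil N
      have hfold : (((PySem.Str.split? N "\n").getD []).foldl
            (fun acc line => acc ++ ["data: " ++ line]) ["event: " ++ e])
          = ("event: " ++ e) :: y :: ys := by
        rw [pvFoldlAppendMap] at hpay ⊢
        simp only [List.nil_append] at hpay
        rw [hpay]
        rfl
      rw [hfold, pvJoinConsCons, ← hpay, pvStringKey N]
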